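-- pv_equiv track=rewrite | github.com/JoeAugusta/leadgen | enrich_and_draft.py | classify_role_segment
-- ===== SOURCE A (Python) =====
-- def classify_role_segment(title: str, lead_type: str) -> tuple[str, str]:
--     """
--     Returns (role_segment, style_guidance) used to tailor outreach.
--     """
--     t = (title or "").strip().lower()
--     lt = (lead_type or "").strip().lower()
--
--     # Agency-side heuristics
--     if "agency" in lt:
--         if any(k in t for k in ["owner", "founder", "co-founder", "principal", "partner", "managing director", "ceo"]):
--             return (
--                 "Agency Owner/Principal",
--                 "Peer-to-peer operator tone. Focus on collaboration/overflow/creative engine. Avoid pitching. Ask how they handle creative testing for client accounts today."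
--             )
--         if any(k in t for k in ["vp", "vice president", "head of", "director", "growth", "marketing", "strategy"]):
--             return (
--                 "Agency Marketing/Strategy Lead",
--                 "Respectful, curious tone. Talk about how agencies position + deliver creative iteration for DTC clients. Ask what clients are asking for most (volume vs structured testing)."
--             )
--         return (
--             "Agency Team Member",
--             "Friendly curiosity. Ask what service line is growing fastest and where creative becomes a bottleneck."
--         )
--
--     # DTC-side heuristics
--     if any(k in t for k in ["founder", "co-founder", "owner", "ceo", "president"]):
--         return (
--             "Founder/Owner",
--             "Short, direct, founder-friendly. One concrete observation + one simple question. No fluff. No meeting ask in first touch."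
--         )
--
--     if any(k in t for k in ["vp marketing", "vice president of marketing", "vp, marketing", "svp marketing", "evp marketing", "cmo"]):
--         return (
--             "VP Marketing/CMO",
--             "Operator-to-operator. Show you noticed something specific. Ask a smart question about creative testing process (volume vs experimentation, fatigue, iteration loop)."
--         )
--
--     if any(k in t for k in ["head of growth", "vp growth", "director of growth", "growth lead", "acquisition", "performance marketing", "paid social"]):
--         return (
--             "Head of Growth/Performance",
--             "Technical-but-not-jargony. Mention experimentation/creative fatigue/iteration velocity. Ask about how they decide what to test next."
--         )
--
--     if any(k in t for k in ["marketing manager", "brand manager", "social", "content", "creative"]):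
--         return (
--             "Marketing/Brand Manager",
--             "Supportive + curious. Ask how they source creative ideas and keep fresh variants coming. Make it easy to reply."
--         )
--
--     return (
--         "Unknown",
--         "Default to peer curiosity. One concrete observation + a simple question. Keep it human and non-salesy."
--     )
-- ===== SOURCE B (Python) =====
-- # Keyword -> priority map plus a result array; pick the result with the
-- # minimum matched priority (argmin selection), defaulting to the last entry.
--
-- _AGENCY_PRIORITY = {
--     "owner": 0, "founder": 0, "co-founder": 0, "principal": 0, "partner": 0,
--     "managing director": 0, "ceo": 0,
--     "vp": 1, "vice president": 1, "head of": 1, "director": 1, "growth": 1,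
--     "marketing": 1, "strategy": 1,
-- }
--
-- _AGENCY_RESULTS = [
--     ("Agency Owner/Principal",
--      "Peer-to-peer operator tone. Focus on collaboration/overflow/creative engine. Avoid pitching. Ask how they handle creative testing for client accounts today."),
--     ("Agency Marketing/Strategy Lead",
--      "Respectful, curious tone. Talk about how agencies position + deliver creative iteration for DTC clients. Ask what clients are asking for most (volume vs structured testing)."),
--     ("Agency Team Member",
--      "Friendly curiosity. Ask what service line is growing fastest and where creative becomes a bottleneck."),
-- ]
--
-- _DTC_PRIORITY = {
--     "founder": 0, "co-founder": 0, "owner": 0, "ceo": 0, "president": 0,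
--     "vp marketing": 1, "vice president of marketing": 1, "vp, marketing": 1,
--     "svp marketing": 1, "evp marketing": 1, "cmo": 1,
--     "head of growth": 2, "vp growth": 2, "director of growth": 2, "growth lead": 2,
--     "acquisition": 2, "performance marketing": 2, "paid social": 2,
--     "marketing manager": 3, "brand manager": 3, "social": 3, "content": 3, "creative": 3,
-- }
--
-- _DTC_RESULTS = [
--     ("Founder/Owner",
--      "Short, direct, founder-friendly. One concrete observation + one simple question. No fluff. No meeting ask in first touch."),
--     ("VP Marketing/CMO",
--      "Operator-to-operator. Show you noticed something specific. Ask a smart question about creative testing process (volume vs experimentation, fatigue, iteration loop)."),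
--     ("Head of Growth/Performance",
--      "Technical-but-not-jargony. Mention experimentation/creative fatigue/iteration velocity. Ask about how they decide what to test next."),
--     ("Marketing/Brand Manager",
--      "Supportive + curious. Ask how they source creative ideas and keep fresh variants coming. Make it easy to reply."),
--     ("Unknown",
--      "Default to peer curiosity. One concrete observation + a simple question. Keep it human and non-salesy."),
-- ]
--
--
--
-- def _pick(t, prio, results):
--     best = min((p for kw, p in prio.items() if kw in t), default=len(results) - 1)
--     return results[best]
--
--
-- def classify_role_segment(title: str, lead_type: str) -> tuple[str, str]:
--     t = (title or "").strip().lower()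
--     lt = (lead_type or "").strip().lower()
--     if "agency" in lt:
--         return _pick(t, _AGENCY_PRIORITY, _AGENCY_RESULTS)
--     return _pick(t, _DTC_PRIORITY, _DTC_RESULTS)
-- ===== Notes on version B (the rewrite author's own statement) =====
-- stated objective: alternative
-- what changed: Replaced the ordered if-cascade / first-match scan with a flat keyword->priority map and a result array: score every matching keyword and pick the result of the minimum priority (argmin), defaulting to the last entry.
import Mathlib
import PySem

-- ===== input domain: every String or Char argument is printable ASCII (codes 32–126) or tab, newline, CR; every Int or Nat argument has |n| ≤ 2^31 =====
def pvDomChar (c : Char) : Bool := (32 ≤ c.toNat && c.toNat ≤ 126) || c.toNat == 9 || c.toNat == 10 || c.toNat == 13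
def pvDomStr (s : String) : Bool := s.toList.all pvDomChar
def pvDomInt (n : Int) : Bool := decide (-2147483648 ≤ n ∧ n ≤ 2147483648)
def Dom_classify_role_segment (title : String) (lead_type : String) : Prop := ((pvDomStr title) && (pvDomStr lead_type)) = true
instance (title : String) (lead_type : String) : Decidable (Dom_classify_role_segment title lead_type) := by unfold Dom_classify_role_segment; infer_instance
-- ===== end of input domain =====

-- B replaces A's first-match if-cascade by a flat keyword→priority map with a result
-- array, selecting the result of the minimum matched priority (objective: alternative).

-- ===== PORT A =====
def classify_role_segment (title : String) (lead_type : String) : String × String :=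
  let t := PySem.Str.lower (PySem.Str.strip title)
  let lt := PySem.Str.lower (PySem.Str.strip lead_type)
  if PySem.Str.isIn "agency" lt then
    if (["owner", "founder", "co-founder", "principal", "partner", "managing director", "ceo"].any (fun k => PySem.Str.isIn k t)) then
      ("Agency Owner/Principal",
       "Peer-to-peer operator tone. Focus on collaboration/overflow/creative engine. Avoid pitching. Ask how they handle creative testing for client accounts today.")
    else if (["vp", "vice president", "head of", "director", "growth", "marketing", "strategy"].any (fun k => PySem.Str.isIn k t)) then
      ("Agency Marketing/Strategy Lead",
       "Respectful, curious tone. Talk about how agencies position + deliver creative iteration for DTC clients. Ask what clients are asking for most (volume vs structured testing).")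
    else
      ("Agency Team Member",
       "Friendly curiosity. Ask what service line is growing fastest and where creative becomes a bottleneck.")
  else if (["founder", "co-founder", "owner", "ceo", "president"].any (fun k => PySem.Str.isIn k t)) then
    ("Founder/Owner",
     "Short, direct, founder-friendly. One concrete observation + one simple question. No fluff. No meeting ask in first touch.")
  else if (["vp marketing", "vice president of marketing", "vp, marketing", "svp marketing", "evp marketing", "cmo"].any (fun k => PySem.Str.isIn k t)) then
    ("VP Marketing/CMO",
     "Operator-to-operator. Show you noticed something specific. Ask a smart question about creative testing process (volume vs experimentation, fatigue, iteration loop).")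
  else if (["head of growth", "vp growth", "director of growth", "growth lead", "acquisition", "performance marketing", "paid social"].any (fun k => PySem.Str.isIn k t)) then
    ("Head of Growth/Performance",
     "Technical-but-not-jargony. Mention experimentation/creative fatigue/iteration velocity. Ask about how they decide what to test next.")
  else if (["marketing manager", "brand manager", "social", "content", "creative"].any (fun k => PySem.Str.isIn k t)) then
    ("Marketing/Brand Manager",
     "Supportive + curious. Ask how they source creative ideas and keep fresh variants coming. Make it easy to reply.")
  else
    ("Unknown",
     "Default to peer curiosity. One concrete observation + a simple question. Keep it human and non-salesy.")

-- ===== PORT B =====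
def pvAgencyPrio : List (String × Nat) :=
  [("owner", 0), ("founder", 0), ("co-founder", 0), ("principal", 0), ("partner", 0),
   ("managing director", 0), ("ceo", 0),
   ("vp", 1), ("vice president", 1), ("head of", 1), ("director", 1), ("growth", 1),
   ("marketing", 1), ("strategy", 1)]

def pvAgencyResults : List (String × String) :=
  [("Agency Owner/Principal",
    "Peer-to-peer operator tone. Focus on collaboration/overflow/creative engine. Avoid pitching. Ask how they handle creative testing for client accounts today."),
   ("Agency Marketing/Strategy Lead",
    "Respectful, curious tone. Talk about how agencies position + deliver creative iteration for DTC clients. Ask what clients are asking for most (volume vs structured testing)."),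
   ("Agency Team Member",
    "Friendly curiosity. Ask what service line is growing fastest and where creative becomes a bottleneck.")]

def pvDtcPrio : List (String × Nat) :=
  [("founder", 0), ("co-founder", 0), ("owner", 0), ("ceo", 0), ("president", 0),
   ("vp marketing", 1), ("vice president of marketing", 1), ("vp, marketing", 1),
   ("svp marketing", 1), ("evp marketing", 1), ("cmo", 1),
   ("head of growth", 2), ("vp growth", 2), ("director of growth", 2), ("growth lead", 2),
   ("acquisition", 2), ("performance marketing", 2), ("paid social", 2),
   ("marketing manager", 3), ("brand manager", 3), ("social", 3), ("content", 3), ("creative", 3)]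

def pvDtcResults : List (String × String) :=
  [("Founder/Owner",
    "Short, direct, founder-friendly. One concrete observation + one simple question. No fluff. No meeting ask in first touch."),
   ("VP Marketing/CMO",
    "Operator-to-operator. Show you noticed something specific. Ask a smart question about creative testing process (volume vs experimentation, fatigue, iteration loop)."),
   ("Head of Growth/Performance",
    "Technical-but-not-jargony. Mention experimentation/creative fatigue/iteration velocity. Ask about how they decide what to test next."),
   ("Marketing/Brand Manager",
    "Supportive + curious. Ask how they source creative ideas and keep fresh variants coming. Make it easy to reply."),
   ("Unknown",
    "Default to peer curiosity. One concrete observation + a simple question. Keep it human and non-salesy.")]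

-- priorities of the keywords occurring in t (the generator `p for kw, p in prio.items() if kw in t`)
def pvMatchPrios (t : String) (prio : List (String × Nat)) : List Nat :=
  prio.filterMap (fun e => if PySem.Str.isIn e.1 t then some e.2 else none)

-- Python's min(xs, default=…) core as an Option-valued fold (first minimal element)
def pvMin? (xs : List Nat) : Option Nat :=
  xs.foldl (fun a p => match a with | none => some p | some m => if p < m then some p else some m) none

-- _pick(t, prio, results): results[min(matched priorities, default=len(results)-1)]
-- (the index is always in range, so the `none` branch of pyGet? is unreachable)
def pvPick (t : String) (prio : List (String × Nat)) (results : List (String × String)) : String × String :=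
  match PySem.List.pyGet? results (Int.ofNat ((pvMin? (pvMatchPrios t prio)).getD (results.length - 1))) with
  | some r => r
  | none => ("", "")

def classify_role_segment_alt (title : String) (lead_type : String) : String × String :=
  let t := PySem.Str.lower (PySem.Str.strip title)
  let lt := PySem.Str.lower (PySem.Str.strip lead_type)
  if PySem.Str.isIn "agency" lt then pvPick t pvAgencyPrio pvAgencyResults
  else pvPick t pvDtcPrio pvDtcResults

-- ===== PRECONDITION & SPEC =====
def Spec_classify_role_segment (title : String) (lead_type : String) (out : String × String) : Prop := out = classify_role_segment_alt title lead_type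
instance (title : String) (lead_type : String) (out : String × String) : Decidable (Spec_classify_role_segment title lead_type out) := by unfold Spec_classify_role_segment; infer_instance

-- ===== CLAIM (what is proved, stated in full; the proofs are below) =====
def Claim_equal_classify_role_segment : Prop := ∀ (title : String) (lead_type : String), Dom_classify_role_segment title lead_type → Spec_classify_role_segment title lead_type (classify_role_segment title lead_type)

-- ===== LEMMAS AND PROOFS =====

-- flatten keyword groups into a keyword→priority list, priorities counted from i
def pvFlat (i : Nat) : List (List String) → List (String × Nat)
  | [] => []
  | kws :: rest => kws.map (fun k => (k, i)) ++ pvFlat (i + 1) rest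

-- index of the first group containing a keyword of t, counted from i
def pvFirstIdx? (t : String) (i : Nat) : List (List String) → Option Nat
  | [] => none
  | kws :: rest => if kws.any (fun k => PySem.Str.isIn k t) then some i else pvFirstIdx? t (i + 1) rest

theorem pvMatchPrios_append (t : String) (xs ys : List (String × Nat)) :
    pvMatchPrios t (xs ++ ys) = pvMatchPrios t xs ++ pvMatchPrios t ys := by
  simp [pvMatchPrios]

theorem pvMatchPrios_map (t : String) (kws : List String) (i : Nat) :
    pvMatchPrios t (kws.map (fun k => (k, i))) =
      (kws.filter (fun k => PySem.Str.isIn k t)).map (fun _ => i) := by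
  induction kws with
  | nil => rfl
  | cons k ks ih =>
      cases h : PySem.Str.isIn k t <;>
        simp only [List.map_cons, pvMatchPrios, List.filterMap_cons, List.filter_cons, h,
          Bool.false_eq_true, if_false, if_true] <;>
        simpa [pvMatchPrios] using ih

theorem pvFold_keep (xs : List Nat) (m : Nat) (h : ∀ p ∈ xs, m ≤ p) :
    xs.foldl (fun a p => match a with | none => some p | some m => if p < m then some p else some m)
      (some m) = some m := by
  induction xs with
  | nil => rfl
  | cons x xs ih =>
      have hx : ¬ x < m := by have := h x (by simp); omega
      simp only [List.foldl_cons, hx, if_false]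
      exact ih (fun p hp => h p (by simp [hp]))

theorem pvFlat_bound (t : String) (groups : List (List String)) :
    ∀ i, ∀ p ∈ pvMatchPrios t (pvFlat i groups), i ≤ p := by
  induction groups with
  | nil => intro i p hp; simp [pvFlat, pvMatchPrios] at hp
  | cons kws rest ih =>
      intro i p hp
      rw [pvFlat, pvMatchPrios_append, pvMatchPrios_map] at hp
      rcases List.mem_append.mp hp with h | h
      · rcases List.mem_map.mp h with ⟨_, _, rfl⟩; omega
      · have := ih (i + 1) p h; omega

theorem pvMin?_flat (t : String) (groups : List (List String)) :
    ∀ i, pvMin? (pvMatchPrios t (pvFlat i groups)) = pvFirstIdx? t i groups := by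
  induction groups with
  | nil => intro i; rfl
  | cons kws rest ih =>
      intro i
      rw [pvFlat, pvMatchPrios_append, pvMatchPrios_map, pvFirstIdx?]
      by_cases h : kws.any (fun k => PySem.Str.isIn k t) = true
      · obtain ⟨k, hk, hkt⟩ := List.any_eq_true.mp h
        cases hfil : kws.filter (fun k => PySem.Str.isIn k t) with
        | nil =>
            exfalso
            have hnot := List.filter_eq_nil_iff.mp hfil k hk
            have hkt' : PySem.Chars.isIn k.toList t.toList = true := hkt
            simp [hkt'] at hnot
        | cons a as =>
            rw [if_pos h]
            simp only [List.map_cons, pvMin?, List.cons_append, List.foldl_cons]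
            exact pvFold_keep _ i (by
              intro p hp
              rcases List.mem_append.mp hp with hq | hq
              · rcases List.mem_map.mp hq with ⟨_, _, rfl⟩; omega
              · have := pvFlat_bound t rest (i + 1) p hq; omega)
      · have hfil : kws.filter (fun k => PySem.Str.isIn k t) = [] := by
          apply List.filter_eq_nil_iff.mpr
          intro k hk
          by_contra hc
          exact h (List.any_eq_true.mpr ⟨k, hk, by simpa using hc⟩)
        rw [if_neg h, hfil]
        simpa using ih (i + 1)

theorem pvAgencyPrio_eq :
    pvAgencyPrio = pvFlat 0
      [["owner", "founder", "co-founder", "principal", "partner", "managing director", "ceo"],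
       ["vp", "vice president", "head of", "director", "growth", "marketing", "strategy"]] := by
  rfl

theorem pvDtcPrio_eq :
    pvDtcPrio = pvFlat 0
      [["founder", "co-founder", "owner", "ceo", "president"],
       ["vp marketing", "vice president of marketing", "vp, marketing", "svp marketing", "evp marketing", "cmo"],
       ["head of growth", "vp growth", "director of growth", "growth lead", "acquisition", "performance marketing", "paid social"],
       ["marketing manager", "brand manager", "social", "content", "creative"]] := by
  rfl

theorem pvPick_agency (t : String) :
    pvPick t pvAgencyPrio pvAgencyResults =
      (if (["owner", "founder", "co-founder", "principal", "partner", "managing director", "ceo"].any (fun k => PySem.Str.isIn k t)) then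
        ("Agency Owner/Principal",
         "Peer-to-peer operator tone. Focus on collaboration/overflow/creative engine. Avoid pitching. Ask how they handle creative testing for client accounts today.")
      else if (["vp", "vice president", "head of", "director", "growth", "marketing", "strategy"].any (fun k => PySem.Str.isIn k t)) then
        ("Agency Marketing/Strategy Lead",
         "Respectful, curious tone. Talk about how agencies position + deliver creative iteration for DTC clients. Ask what clients are asking for most (volume vs structured testing).")
      else
        ("Agency Team Member",
         "Friendly curiosity. Ask what service line is growing fastest and where creative becomes a bottleneck.")) := by
  unfold pvPick
  rw [pvAgencyPrio_eq, pvMin?_flat]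
  simp only [pvFirstIdx?]
  by_cases h0 : (["owner", "founder", "co-founder", "principal", "partner", "managing director", "ceo"].any (fun k => PySem.Str.isIn k t)) = true
  · simp only [if_pos h0]; rfl
  · simp only [if_neg h0]
    by_cases h1 : (["vp", "vice president", "head of", "director", "growth", "marketing", "strategy"].any (fun k => PySem.Str.isIn k t)) = true
    · simp only [if_pos h1]; rfl
    · simp only [if_neg h1]; rfl

theorem pvPick_dtc (t : String) :
    pvPick t pvDtcPrio pvDtcResults =
      (if (["founder", "co-founder", "owner", "ceo", "president"].any (fun k => PySem.Str.isIn k t)) then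
        ("Founder/Owner",
         "Short, direct, founder-friendly. One concrete observation + one simple question. No fluff. No meeting ask in first touch.")
      else if (["vp marketing", "vice president of marketing", "vp, marketing", "svp marketing", "evp marketing", "cmo"].any (fun k => PySem.Str.isIn k t)) then
        ("VP Marketing/CMO",
         "Operator-to-operator. Show you noticed something specific. Ask a smart question about creative testing process (volume vs experimentation, fatigue, iteration loop).")
      else if (["head of growth", "vp growth", "director of growth", "growth lead", "acquisition", "performance marketing", "paid social"].any (fun k => PySem.Str.isIn k t)) then
        ("Head of Growth/Performance",
         "Technical-but-not-jargony. Mention experimentation/creative fatigue/iteration velocity. Ask about how they decide what to test next.")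
      else if (["marketing manager", "brand manager", "social", "content", "creative"].any (fun k => PySem.Str.isIn k t)) then
        ("Marketing/Brand Manager",
         "Supportive + curious. Ask how they source creative ideas and keep fresh variants coming. Make it easy to reply.")
      else
        ("Unknown",
         "Default to peer curiosity. One concrete observation + a simple question. Keep it human and non-salesy.")) := by
  unfold pvPick
  rw [pvDtcPrio_eq, pvMin?_flat]
  simp only [pvFirstIdx?]
  by_cases h0 : (["founder", "co-founder", "owner", "ceo", "president"].any (fun k => PySem.Str.isIn k t)) = true
  · simp only [if_pos h0]; rfl
  · simp only [if_neg h0]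
    by_cases h1 : (["vp marketing", "vice president of marketing", "vp, marketing", "svp marketing", "evp marketing", "cmo"].any (fun k => PySem.Str.isIn k t)) = true
    · simp only [if_pos h1]; rfl
    · simp only [if_neg h1]
      by_cases h2 : (["head of growth", "vp growth", "director of growth", "growth lead", "acquisition", "performance marketing", "paid social"].any (fun k => PySem.Str.isIn k t)) = true
      · simp only [if_pos h2]; rfl
      · simp only [if_neg h2]
        by_cases h3 : (["marketing manager", "brand manager", "social", "content", "creative"].any (fun k => PySem.Str.isIn k t)) = true
        · simp only [if_pos h3]; rfl
        · simp only [if_neg h3]; rfl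

-- ===== VERDICT (by name: the statement is the Claim_ definition above) =====
theorem classify_role_segment_spec : Claim_equal_classify_role_segment := by
  intro title lead_type _
  unfold Spec_classify_role_segment
  simp only [classify_role_segment, classify_role_segment_alt]
  by_cases hag : PySem.Str.isIn "agency" (PySem.Str.lower (PySem.Str.strip lead_type)) = true
  · simp only [if_pos hag]
    exact (pvPick_agency _).symm
  · simp only [if_neg hag]
    exact (pvPick_dtc _).symm
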